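-- pv_equiv track=rewrite | github.com/Shakunthala98/shaku | PYTHON/day3_que.py | alph
-- ===== SOURCE A (Python) =====
-- def alph(s):
--     tmp=''
--     res=''
--     for i in range(len(s)):
--         tmp += s[i]
--         if len(tmp) > len(res):
--             res = tmp
--         if i > len(s)-2:
--             break
--         if s[i] > s[i+1]:
--             tmp = ''
--     return ("Longest substring in alphabetical order is: {}".format(res))
-- ===== SOURCE B (Python) =====
-- def alph(s):
--     n = len(s)
--     # DP from the right: L[i] = length of the non-decreasing run starting at i
--     L = [0] * n
--     for i in range(n - 1, -1, -1):
--         L[i] = 1 if i == n - 1 or s[i] > s[i + 1] else L[i + 1] + 1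
--     # earliest argmax of L, then slice
--     best, blen = 0, 0
--     for i in range(n):
--         if L[i] > blen:
--             best, blen = i, L[i]
--     return "Longest substring in alphabetical order is: {}".format(s[best:best + blen])
-- ===== Notes on version B (the rewrite author's own statement) =====
-- stated objective: alternative
-- what changed: B builds a right-to-left DP table L where L[i] is the length of the non-decreasing run starting at i, takes the earliest argmax of L in a second pass, and slices s once, instead of A's forward scan that accumulates a tmp string and updates the best string per character.
import Mathlib
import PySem

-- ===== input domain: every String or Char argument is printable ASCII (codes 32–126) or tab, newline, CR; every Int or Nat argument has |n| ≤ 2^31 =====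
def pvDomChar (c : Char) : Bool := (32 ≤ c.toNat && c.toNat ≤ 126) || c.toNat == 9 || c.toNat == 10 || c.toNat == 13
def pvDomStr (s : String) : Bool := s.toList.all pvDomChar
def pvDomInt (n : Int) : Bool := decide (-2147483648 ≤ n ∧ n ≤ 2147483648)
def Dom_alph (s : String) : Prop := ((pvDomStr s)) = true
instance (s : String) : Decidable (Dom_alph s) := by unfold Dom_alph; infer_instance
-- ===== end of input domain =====

-- B replaces A's forward scan that accumulates a tmp string with a right-to-left DP table of
-- run lengths followed by an earliest-argmax pass and one slice (alternative decomposition).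

-- ===== PORT A =====
-- A's loop over i in range(len(s)) with the 'break' on the last index and the lookahead
-- s[i] > s[i+1]; transliterated as recursion on the character list (the last-index break is
-- the single-element case, the lookahead is the second pattern element).
def alphA_loop : List Char → List Char → List Char → List Char
  | [], _tmp, res => res
  | [c], tmp, res =>
      let tmp := tmp ++ [c]
      if res.length < tmp.length then tmp else res
  | c :: c' :: rest, tmp, res =>
      let tmp := tmp ++ [c]
      let res := if res.length < tmp.length then tmp else res
      alphA_loop (c' :: rest) (if c' < c then [] else tmp) res

def alph (s : String) : String :=
  "Longest substring in alphabetical order is: " ++ String.mk (alphA_loop s.toList [] [])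

-- ===== PORT B =====
-- Source B's backward fill 'L[i] = 1 if i == n-1 or s[i] > s[i+1] else L[i+1] + 1', as structural
-- recursion on the character list (L[i+1] is the head of the already-built tail table).
def lensB : List Char → List Nat
  | [] => []
  | [_] => [1]
  | c :: c' :: rest =>
      let t := lensB (c' :: rest)
      (if c' < c then 1 else t.head! + 1) :: t

-- Source B's 'for i in range(n): if L[i] > blen: best, blen = i, L[i]' with i carried explicitly
def argB : List Nat → Nat → Nat × Nat → Nat × Nat
  | [], _, acc => acc
  | v :: rest, i, (b, bl) => argB rest (i + 1) (if bl < v then (i, v) else (b, bl))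

-- s[best:best+blen] with 0 ≤ best and 0 ≤ blen is exactly drop best then take blen
def alph_alt (s : String) : String :=
  "Longest substring in alphabetical order is: " ++
    String.mk ((s.toList.drop (argB (lensB s.toList) 0 (0, 0)).1).take
      (argB (lensB s.toList) 0 (0, 0)).2)

-- ===== PRECONDITION & SPEC =====
def Spec_alph (s : String) (out : String) : Prop := out = alph_alt s
instance (s : String) (out : String) : Decidable (Spec_alph s out) := by unfold Spec_alph; infer_instance

-- ===== CLAIM (what is proved, stated in full; the proofs are below) =====
def Claim_equal_alph : Prop := ∀ (s : String), Dom_alph s → Spec_alph s (alph s)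

-- ===== LEMMAS AND PROOFS =====

-- reference decomposition used only by the proofs: maximal non-decreasing runs, earliest max
def alphB_runs : List Char → List Char → List (List Char)
  | [], cur => [cur]
  | c :: rest, cur =>
      if cur ≠ [] ∧ c < cur.getLast! then cur :: alphB_runs rest [c]
      else alphB_runs rest (cur ++ [c])

def alphB_max : List (List Char) → List Char → List Char
  | [], best => best
  | r :: rest, best => alphB_max rest (if best.length < r.length then r else best)

def countdown : Nat → List Nat
  | 0 => []
  | m + 1 => (m + 1) :: countdown m

theorem getLast!_concat : ∀ (l : List Char) (c : Char), (l ++ [c]).getLast! = c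
  | [], _ => rfl
  | [_], _ => rfl
  | _ :: y :: ys, c => by
      rw [List.cons_append]
      have : ((y :: ys) ++ [c]).getLast! = c := getLast!_concat (y :: ys) c
      simpa [List.getLast!] using this

theorem runs_cons (c : Char) (rest cur : List Char) :
    alphB_runs (c :: rest) cur =
      if cur ≠ [] ∧ c < cur.getLast! then cur :: alphB_runs rest [c]
      else alphB_runs rest (cur ++ [c]) := rfl

theorem runs_shape (cs : List Char) : ∀ cur, ∃ u rs, alphB_runs cs cur = (cur ++ u) :: rs := by
  induction cs with
  | nil => intro cur; exact ⟨[], [], by simp [alphB_runs]⟩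
  | cons c rest ih =>
      intro cur
      by_cases h : cur ≠ [] ∧ c < cur.getLast!
      · exact ⟨[], alphB_runs rest [c], by rw [runs_cons, if_pos h]; simp⟩
      · obtain ⟨u, rs, hu⟩ := ih (cur ++ [c])
        exact ⟨[c] ++ u, rs, by rw [runs_cons, if_neg h, hu]; simp⟩

-- the per-prefix best update in A does not change the final max: the head run extends t
theorem max_absorb (rs : List (List Char)) (t u best : List Char) :
    alphB_max ((t ++ u) :: rs) (if best.length < t.length then t else best)
      = alphB_max ((t ++ u) :: rs) best := by
  simp only [alphB_max]
  congr 1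
  have hlen : (t ++ u).length = t.length + u.length := by simp
  by_cases hb : best.length < t.length
  · rw [if_pos hb]
    have h1 : best.length < (t ++ u).length := by omega
    rw [if_pos h1]
    by_cases ht : t.length < (t ++ u).length
    · rw [if_pos ht]
    · rw [if_neg ht]
      have hu : u = [] := List.eq_nil_of_length_eq_zero (by omega)
      simp [hu]
  · rw [if_neg hb]

theorem main_lemma (cs : List Char) :
    ∀ c cur best, (cur = [] ∨ ¬ c < cur.getLast!) →
      alphA_loop (c :: cs) cur best = alphB_max (alphB_runs (c :: cs) cur) best := by
  induction cs with
  | nil =>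
      intro c cur best hinv
      have hsplit : ¬ (cur ≠ [] ∧ c < cur.getLast!) := by
        rcases hinv with h | h
        · intro hx; exact hx.1 h
        · intro hx; exact h hx.2
      rw [runs_cons, if_neg hsplit]
      simp only [alphA_loop, alphB_runs, alphB_max]
  | cons c' rest ih =>
      intro c cur best hinv
      have hsplit : ¬ (cur ≠ [] ∧ c < cur.getLast!) := by
        rcases hinv with h | h
        · intro hx; exact hx.1 h
        · intro hx; exact h hx.2
      rw [runs_cons, if_neg hsplit]
      show alphA_loop (c' :: rest) (if c' < c then [] else cur ++ [c])
            (if best.length < (cur ++ [c]).length then cur ++ [c] else best)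
          = alphB_max (alphB_runs (c' :: rest) (cur ++ [c])) best
      by_cases hc : c' < c
      · have hcond : (cur ++ [c]) ≠ [] ∧ c' < (cur ++ [c]).getLast! := by
          refine ⟨by simp, ?_⟩
          rw [getLast!_concat]; exact hc
        rw [runs_cons c' rest (cur ++ [c]), if_pos hcond]
        rw [if_pos hc, ih c' [] _ (Or.inl rfl)]
        have h0 : alphB_runs (c' :: rest) ([] : List Char) = alphB_runs rest [c'] := by
          rw [runs_cons, if_neg (by simp)]; rfl
        rw [h0]
        simp only [alphB_max]
      · have hinv' : (cur ++ [c]) = [] ∨ ¬ c' < (cur ++ [c]).getLast! := by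
          right; rw [getLast!_concat]; exact hc
        rw [if_neg hc, ih c' (cur ++ [c]) _ hinv']
        obtain ⟨u, rs, hu⟩ := runs_shape (c' :: rest) (cur ++ [c])
        rw [hu, max_absorb]

theorem flatten_runs : ∀ (cs cur : List Char), (alphB_runs cs cur).flatten = cur ++ cs := by
  intro cs
  induction cs with
  | nil => intro cur; simp [alphB_runs]
  | cons c rest ih =>
      intro cur
      by_cases h : cur ≠ [] ∧ c < cur.getLast!
      · rw [runs_cons, if_pos h]; simp [ih]
      · rw [runs_cons, if_neg h]; simp [ih]

theorem runs_ne : ∀ (cs cur : List Char), cur ≠ [] → ∀ r ∈ alphB_runs cs cur, r ≠ [] := by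
  intro cs
  induction cs with
  | nil =>
      intro cur hc r hr
      rw [show alphB_runs [] cur = [cur] from rfl, List.mem_singleton] at hr
      exact hr ▸ hc
  | cons c rest ih =>
      intro cur hc r hr
      by_cases h : cur ≠ [] ∧ c < cur.getLast!
      · rw [runs_cons, if_pos h] at hr
        rcases List.mem_cons.mp hr with hr | hr
        · exact hr ▸ hc
        · exact ih [c] (by simp) r hr
      · rw [runs_cons, if_neg h] at hr
        exact ih (cur ++ [c]) (by simp) r hr

theorem chain_snoc : ∀ (cur : List Char) (c : Char), List.IsChain (· ≤ ·) cur →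
    (cur = [] ∨ cur.getLast! ≤ c) → List.IsChain (· ≤ ·) (cur ++ [c])
  | [], c, _, _ => by simp
  | [a], c, _, h => by
      have ha : a ≤ c := by
        rcases h with h | h
        · exact absurd h (by simp)
        · simpa [List.getLast!] using h
      simpa using List.isChain_pair.mpr ha
  | a :: b :: cur', c, hch, h => by
      obtain ⟨h1, h2⟩ := List.isChain_cons_cons.mp hch
      have h3 : (b :: cur').getLast! ≤ c := by
        rcases h with h | h
        · exact absurd h (by simp)
        · simpa [List.getLast!] using h
      have ih := chain_snoc (b :: cur') c h2 (Or.inr h3)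
      rw [List.cons_append]
      exact List.isChain_cons_cons.mpr ⟨h1, by simpa using ih⟩

theorem lensB_sorted : ∀ (cur : List Char), List.IsChain (· ≤ ·) cur →
    lensB cur = countdown cur.length
  | [], _ => rfl
  | [_], _ => rfl
  | a :: b :: cur', hch => by
      obtain ⟨h1, h2⟩ := List.isChain_cons_cons.mp hch
      have ih := lensB_sorted (b :: cur') h2
      show (if b < a then 1 else (lensB (b :: cur')).head! + 1) :: lensB (b :: cur')
          = countdown (a :: b :: cur').length
      rw [ih, if_neg (not_lt.mpr h1)]
      simp [countdown, List.head!]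

theorem lensB_split : ∀ (cur : List Char) (c : Char) (rest : List Char), cur ≠ [] →
    List.IsChain (· ≤ ·) cur → c < cur.getLast! →
    lensB (cur ++ c :: rest) = countdown cur.length ++ lensB (c :: rest)
  | [], _, _, h, _, _ => absurd rfl h
  | [a], c, rest, _, _, hlt => by
      have hca : c < a := by simpa [List.getLast!] using hlt
      show (if c < a then 1 else (lensB (c :: rest)).head! + 1) :: lensB (c :: rest)
          = countdown 1 ++ lensB (c :: rest)
      rw [if_pos hca]
      rfl
  | a :: b :: cur', c, rest, _, hch, hlt => by
      obtain ⟨h1, h2⟩ := List.isChain_cons_cons.mp hch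
      have hlt' : c < (b :: cur').getLast! := by simpa [List.getLast!] using hlt
      have ih := lensB_split (b :: cur') c rest (by simp) h2 hlt'
      have hb : (b :: cur') ++ c :: rest = b :: (cur' ++ c :: rest) := by simp
      rw [hb] at ih
      show (if b < a then 1 else (lensB (b :: (cur' ++ c :: rest))).head! + 1)
            :: lensB (b :: (cur' ++ c :: rest))
          = countdown (a :: b :: cur').length ++ lensB (c :: rest)
      rw [ih, if_neg (not_lt.mpr h1)]
      simp [countdown, List.head!]

theorem lensB_runs_eq : ∀ (cs cur : List Char), List.IsChain (· ≤ ·) cur →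
    lensB (cur ++ cs) = ((alphB_runs cs cur).map (fun r => countdown r.length)).flatten := by
  intro cs
  induction cs with
  | nil =>
      intro cur hch
      simp [alphB_runs, lensB_sorted cur hch]
  | cons c rest ih =>
      intro cur hch
      by_cases h : cur ≠ [] ∧ c < cur.getLast!
      · rw [runs_cons, if_pos h]
        have ihc := ih [c] (by simp)
        rw [List.map_cons, List.flatten_cons, ← ihc,
          lensB_split cur c rest h.1 hch h.2]
        rfl
      · rw [runs_cons, if_neg h]
        have hch' : List.IsChain (· ≤ ·) (cur ++ [c]) := by
          apply chain_snoc cur c hch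
          by_cases hc : cur = []
          · exact Or.inl hc
          · right
            rcases not_and_or.mp h with h' | h'
            · exact absurd (not_not.mp h') hc
            · exact le_of_not_gt h'
        have := ih (cur ++ [c]) hch'
        rw [← this]
        simp

theorem countdown_mem_le : ∀ (m v : Nat), v ∈ countdown m → v ≤ m
  | 0, v, h => by simp [countdown] at h
  | m + 1, v, h => by
      rcases List.mem_cons.mp h with h | h
      · omega
      · have := countdown_mem_le m v h; omega

theorem countdown_length : ∀ m, (countdown m).length = m
  | 0 => rfl
  | m + 1 => by simp [countdown, countdown_length m]

theorem argB_noupd : ∀ (vals : List Nat) (k b bl : Nat), (∀ v ∈ vals, v ≤ bl) →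
    argB vals k (b, bl) = (b, bl)
  | [], _, _, _, _ => rfl
  | v :: rest, k, b, bl, h => by
      have hv : v ≤ bl := h v (by simp)
      show argB rest (k + 1) (if bl < v then (k, v) else (b, bl)) = (b, bl)
      rw [if_neg (not_lt.mpr hv)]
      exact argB_noupd rest (k + 1) b bl (fun w hw => h w (by simp [hw]))

theorem argB_countdown (m k b bl : Nat) :
    argB (countdown m) k (b, bl) = if bl < m then (k, m) else (b, bl) := by
  cases m with
  | zero => simp [countdown, argB]
  | succ m =>
      by_cases h : bl < m + 1
      · rw [if_pos h]
        show argB (countdown m) (k + 1) (if bl < m + 1 then (k, m + 1) else (b, bl)) = (k, m + 1)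
        rw [if_pos h]
        exact argB_noupd _ _ _ _ (fun v hv => by have := countdown_mem_le m v hv; omega)
      · rw [if_neg h]
        show argB (countdown m) (k + 1) (if bl < m + 1 then (k, m + 1) else (b, bl)) = (b, bl)
        rw [if_neg h]
        exact argB_noupd _ _ _ _ (fun v hv => by have := countdown_mem_le m v hv; omega)

theorem argB_append : ∀ (xs ys : List Nat) (k : Nat) (acc : Nat × Nat),
    argB (xs ++ ys) k acc = argB ys (k + xs.length) (argB xs k acc)
  | [], ys, k, acc => by simp [argB]
  | v :: xs, ys, k, (b, bl) => by
      show argB (xs ++ ys) (k + 1) (if bl < v then (k, v) else (b, bl))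
          = argB ys (k + (xs.length + 1)) (argB xs (k + 1) (if bl < v then (k, v) else (b, bl)))
      rw [argB_append xs ys (k + 1)]
      congr 1
      omega

theorem sel : ∀ (blocks : List (List Char)) (cs : List Char) (k b bl : Nat) (run : List Char),
    (∀ r ∈ blocks, r ≠ []) →
    cs.drop k = blocks.flatten →
    run.length = bl →
    (cs.drop b).take bl = run →
    (cs.drop (argB ((blocks.map (fun r => countdown r.length)).flatten) k (b, bl)).1).take
        (argB ((blocks.map (fun r => countdown r.length)).flatten) k (b, bl)).2
      = alphB_max blocks run
  | [], cs, k, b, bl, run, _, _, _, hrun => by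
      simpa [argB, alphB_max] using hrun
  | r :: rest, cs, k, b, bl, run, hne, hdrop, hlen, hrun => by
      have hflat : cs.drop k = r ++ rest.flatten := by simpa using hdrop
      have hdrop' : cs.drop (k + r.length) = rest.flatten := by
        rw [← List.drop_drop, hflat, List.drop_left]
      have hne' : ∀ q ∈ rest, q ≠ [] := fun q hq => hne q (List.mem_cons_of_mem r hq)
      simp only [List.map_cons, List.flatten_cons]
      rw [argB_append, countdown_length, argB_countdown]
      show _ = alphB_max rest (if run.length < r.length then r else run)
      by_cases hblt : bl < r.length
      · rw [if_pos hblt, if_pos (hlen ▸ hblt)]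
        exact sel rest cs (k + r.length) k r.length r hne' hdrop' rfl
          (by rw [hflat, List.take_left])
      · rw [if_neg hblt, if_neg (hlen ▸ hblt)]
        exact sel rest cs (k + r.length) b bl run hne' hdrop' hlen hrun

theorem alph_eq (s : String) : alph s = alph_alt s := by
  unfold alph alph_alt
  cases h : s.toList with
  | nil => simp [alphA_loop, lensB, argB]
  | cons c cs' =>
      have hruns : alphB_runs (c :: cs') [] = alphB_runs cs' [c] := by
        rw [runs_cons, if_neg (by simp)]
        simp
      have hA : alphA_loop (c :: cs') [] [] = alphB_max (alphB_runs cs' [c]) [] := by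
        rw [main_lemma cs' c [] [] (Or.inl rfl), hruns]
      have hlens : lensB (c :: cs')
          = ((alphB_runs cs' [c]).map (fun r => countdown r.length)).flatten := by
        have := lensB_runs_eq (c :: cs') [] (by simp)
        rw [hruns] at this
        exact this
      have hflat : (c :: cs').drop 0 = (alphB_runs cs' [c]).flatten := by
        rw [flatten_runs cs' [c]]
        simp
      have hsel := sel (alphB_runs cs' [c]) (c :: cs') 0 0 0 []
        (runs_ne cs' [c] (by simp)) hflat rfl (by simp)
      rw [hA, hlens]
      exact congrArg _ (congrArg _ hsel.symm)

-- ===== VERDICT (by name: the statement is the Claim_ definition above) =====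
theorem alph_spec : Claim_equal_alph := by
  intro s _
  exact alph_eq s
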